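-- pv_equiv track=rewrite | github.com/AtoposJThrone/churn-prediction-system-t | DATA_Processing_Center(FOR Rederence)/scripts/11_data_transform.py | calc_consecutive_fail
-- ===== SOURCE A (Python) =====
-- def calc_consecutive_fail(series):
--     result = []
--     count = 0
--     for v in series:
--         if v == 0:
--             count += 1
--         else:
--             count = 0
--         result.append(count)
--     return result
-- ===== SOURCE B (Python) =====
-- def calc_consecutive_fail(series):
--     xs = list(series)
--     n = len(xs)
--     result = []
--     i = 0
--     while i < n:
--         j = i
--         if xs[i] == 0:
--             while j < n and xs[j] == 0:
--                 j += 1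
--                 result.append(j - i)
--         else:
--             while j < n and xs[j] != 0:
--                 j += 1
--                 result.append(0)
--         i = j
--     return result
-- ===== Notes on version B (the rewrite author's own statement) =====
-- stated objective: alternative
-- what changed: B scans the series run by run (maximal blocks of zeros / nonzeros) and emits each run's outputs at once (1..k for a zero run, k zeros for a nonzero run), instead of A's per-element running counter.
import Mathlib
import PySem

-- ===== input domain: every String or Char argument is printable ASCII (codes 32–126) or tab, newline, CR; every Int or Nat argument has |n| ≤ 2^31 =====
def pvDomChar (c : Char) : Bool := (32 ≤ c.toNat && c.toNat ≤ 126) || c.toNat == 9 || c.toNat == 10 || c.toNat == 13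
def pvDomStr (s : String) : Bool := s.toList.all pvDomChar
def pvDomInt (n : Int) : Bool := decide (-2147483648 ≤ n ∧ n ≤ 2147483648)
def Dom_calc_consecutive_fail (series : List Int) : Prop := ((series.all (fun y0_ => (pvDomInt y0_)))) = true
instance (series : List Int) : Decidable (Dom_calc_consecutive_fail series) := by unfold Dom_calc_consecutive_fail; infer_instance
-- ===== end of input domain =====

-- B scans the series run by run (maximal zero / nonzero blocks) and emits each run's
-- outputs at once, instead of A's per-element running counter; objective: alternative.


-- ===== PORT A =====
-- literal transliteration of A: one pass keeping (result, count)
def aStep (st : List Int × Int) (v : Int) : List Int × Int :=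
  let count := if v == 0 then st.2 + 1 else (0 : Int)
  (st.1 ++ [count], count)

def calc_consecutive_fail (series : List Int) : List Int :=
  (series.foldl aStep ([], 0)).1

-- ===== PORT B =====
-- transliteration of B: consume one maximal run per step (zero run → 1..k, nonzero run → k zeros)
def calc_consecutive_fail_alt : List Int → List Int
  | [] => []
  | v :: t =>
    if v == 0 then
      (List.range ((t.takeWhile (fun x => x == 0)).length + 1)).map (fun i : Nat => (i : Int) + 1)
        ++ calc_consecutive_fail_alt (t.dropWhile (fun x => x == 0))
    else
      0 :: ((t.takeWhile (fun x => !(x == 0))).map (fun _ => (0 : Int))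
        ++ calc_consecutive_fail_alt (t.dropWhile (fun x => !(x == 0))))
  termination_by l => l.length
  decreasing_by
    · have := List.length_dropWhile_le (fun x => x == 0) t; simp; omega
    · have := List.length_dropWhile_le (fun x => !(x == 0)) t; simp; omega

-- ===== PRECONDITION & SPEC =====
def Spec_calc_consecutive_fail (series : List Int) (out : List Int) : Prop := out = calc_consecutive_fail_alt series
instance (series : List Int) (out : List Int) : Decidable (Spec_calc_consecutive_fail series out) := by unfold Spec_calc_consecutive_fail; infer_instance

-- ===== CLAIM (what is proved, stated in full; the proofs are below) =====
def Claim_equal_calc_consecutive_fail : Prop := ∀ (series : List Int), Dom_calc_consecutive_fail series → Spec_calc_consecutive_fail series (calc_consecutive_fail series)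

-- ===== LEMMAS AND PROOFS =====

-- accumulator-free reading of A's loop
def aGo (c : Int) : List Int → List Int
  | [] => []
  | v :: t =>
    let c' := if v == 0 then c + 1 else 0
    c' :: aGo c' t

theorem foldl_eq_aGo (l : List Int) (acc : List Int) (c : Int) :
    (l.foldl aStep (acc, c)).1 = acc ++ aGo c l := by
  induction l generalizing acc c with
  | nil => simp [aGo]
  | cons v t ih =>
    rw [List.foldl_cons]
    have hs : aStep (acc, c) v
        = (acc ++ [if v == 0 then c + 1 else 0], if v == 0 then c + 1 else 0) := rfl
    rw [hs, ih]
    simp [aGo]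

theorem aGo_zero_run (l : List Int) (c : Int) :
    aGo c l = (List.range ((l.takeWhile (fun x => x == 0)).length)).map (fun i : Nat => c + (i : Int) + 1)
      ++ aGo 0 (l.dropWhile (fun x => x == 0)) := by
  induction l generalizing c with
  | nil => simp [aGo]
  | cons v t ih =>
    by_cases hv : v = 0
    · simp only [aGo, hv, List.takeWhile_cons, List.dropWhile_cons, beq_self_eq_true, if_true]
      simp only [List.length_cons]
      rw [ih (c + 1), List.range_succ_eq_map, List.map_cons, List.map_map]
      simp only [List.cons_append, Nat.cast_zero]
      congr 1
      · ring
      · congr 1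
        apply List.map_congr_left; intro i _
        simp [Function.comp]; ring
    · simp [aGo, hv]

theorem aGo_nonzero_run (l : List Int) :
    aGo 0 l = (l.takeWhile (fun x => !(x == 0))).map (fun _ => (0 : Int))
      ++ aGo 0 (l.dropWhile (fun x => !(x == 0))) := by
  induction l with
  | nil => simp [aGo]
  | cons v t ih =>
    by_cases hv : v = 0
    · simp [hv]
    · simp only [List.takeWhile_cons, List.dropWhile_cons]
      have h : aGo 0 (v :: t) = 0 :: aGo 0 t := by simp [aGo, hv]
      rw [h, ih]
      simp [hv]

theorem aGo_eq_alt (l : List Int) : aGo 0 l = calc_consecutive_fail_alt l := by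
  induction l using calc_consecutive_fail_alt.induct with
  | case1 => simp [aGo, calc_consecutive_fail_alt]
  | case2 v t hv ih =>
    rw [calc_consecutive_fail_alt, if_pos hv, aGo_zero_run]
    simp only [List.takeWhile_cons, List.dropWhile_cons, hv, if_true, List.length_cons]
    rw [ih]
    congr 1
    apply List.map_congr_left; intro i _; omega
  | case3 v t hv ih =>
    rw [calc_consecutive_fail_alt, if_neg hv]
    have h : aGo 0 (v :: t) = 0 :: aGo 0 t := by
      have h0 : ¬ v = 0 := by simpa using hv
      simp [aGo, h0]
    rw [h, aGo_nonzero_run t, ih]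

-- ===== VERDICT (by name: the statement is the Claim_ definition above) =====
theorem calc_consecutive_fail_spec : Claim_equal_calc_consecutive_fail := by
  intro series _
  unfold Spec_calc_consecutive_fail calc_consecutive_fail
  rw [foldl_eq_aGo]
  simpa using aGo_eq_alt series
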